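-- pv_equiv track=rewrite | github.com/lixiang2017/leetcode | foobar.withgoogle.com/level2/lovely-lucky-lambs/solution.py | solution
-- ===== SOURCE A (Python) =====
-- def solution(total_lambs):
--     # Your code here
--     # power of 2
--     p, min1, p_total = 1, 0, 0
--     while p_total + p <= total_lambs:
--         p_total += p
--         min1 += 1
--         p *= 2
--
--     fia, fib, max1, f_total = 1, 1, 0, 0
--     if total_lambs <= 2:
--         max1 = total_lambs
--     else:
--         max1 = f_total = 2
--         fia, fib = fib, fia + fib
--         while f_total + fib <= total_lambs:
--             max1 += 1
--             f_total += fib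
--             fia, fib = fib, fia + fib
--
--     return max1 - min1
-- ===== SOURCE B (Python) =====
-- def solution(total_lambs):
--     if total_lambs < 0:
--         return 0
--     min_h = (total_lambs + 1).bit_length() - 1
--     a, b, paid, max_h = 1, 1, 0, 0
--     while paid + a <= total_lambs:
--         paid += a
--         max_h += 1
--         a, b = b, a + b
--     return max_h - min_h
-- ===== Notes on version B (the rewrite author's own statement) =====
-- stated objective: simpler
-- what changed: The powers-of-2 minimum loop is replaced by the closed form bit_length(total_lambs+1)-1, and the Fibonacci maximum is computed by one uniform greedy loop from the very first payment instead of A's small-input special case plus a pre-advanced loop.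
-- outside the precondition, e.g. on solution(-3): A returns -3, B returns 0; on solution(-1): A returns -1, B returns 0
import Mathlib
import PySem

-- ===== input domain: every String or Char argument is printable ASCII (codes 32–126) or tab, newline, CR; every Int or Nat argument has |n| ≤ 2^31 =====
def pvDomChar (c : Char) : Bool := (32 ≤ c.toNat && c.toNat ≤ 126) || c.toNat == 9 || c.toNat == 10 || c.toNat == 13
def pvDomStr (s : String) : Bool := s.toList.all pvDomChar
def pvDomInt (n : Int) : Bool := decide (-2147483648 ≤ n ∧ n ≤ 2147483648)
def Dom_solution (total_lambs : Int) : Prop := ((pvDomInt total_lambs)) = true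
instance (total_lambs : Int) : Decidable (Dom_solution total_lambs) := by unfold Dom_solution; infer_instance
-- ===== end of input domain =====

-- B replaces A's powers-of-2 loop by the bit_length closed form and A's two-case
-- Fibonacci computation by one uniform greedy loop (objective: simpler).

-- ===== PORT A =====
-- A's first while loop: p doubles, p_total accumulates, min1 counts steps.
-- The extra conjunct 0 < p is a totality guard (always true on reachable states: p starts at 1).
def solnMinLoop (n p min1 p_total : Int) : Int :=
  if _h : p_total + p ≤ n ∧ 0 < p then
    solnMinLoop n (p * 2) (min1 + 1) (p_total + p)
  else min1
termination_by (n - p_total).toNat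
decreasing_by omega

-- A's second while loop on (fia, fib, max1, f_total); the conjuncts 0 < fib, 0 ≤ fia are
-- totality guards (always true on reachable states).
def solnFibLoop (n fia fib max1 f_total : Int) : Int :=
  if _h : f_total + fib ≤ n ∧ 0 < fib ∧ 0 ≤ fia then
    solnFibLoop n fib (fia + fib) (max1 + 1) (f_total + fib)
  else max1
termination_by (n - f_total).toNat
decreasing_by omega

def solution (total_lambs : Int) : Int :=
  let min1 := solnMinLoop total_lambs 1 0 0
  let max1 :=
    if total_lambs ≤ 2 then total_lambs
    else solnFibLoop total_lambs 1 2 2 2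
  max1 - min1

-- ===== PORT B =====
-- B's single greedy loop paying Fibonacci amounts 1,1,2,3,5,…; the conjuncts 0 < a, 0 < b
-- are totality guards (always true on reachable states).
def altPayLoop (n a b paid cnt : Int) : Int :=
  if _h : paid + a ≤ n ∧ 0 < a ∧ 0 < b then
    altPayLoop n b (a + b) (paid + a) (cnt + 1)
  else cnt
termination_by (n - paid).toNat
decreasing_by omega

-- (total_lambs + 1).bit_length() ported as Nat.size of the (nonnegative) toNat value.
def solution_alt (total_lambs : Int) : Int :=
  if total_lambs < 0 then 0
  else
    let min_h : Int := (Nat.size (total_lambs + 1).toNat : Int) - 1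
    let max_h := altPayLoop total_lambs 1 1 0 0
    max_h - min_h

-- ===== PRECONDITION & SPEC =====
-- Pre_ excludes negative lamb totals: there A's small-input base case returns the negative
-- input itself, while B naturally returns zero; a negative number of lambs is outside the
-- function's meaningful domain and neither value is specified.
def Pre_solution (total_lambs : Int) : Prop := 0 ≤ total_lambs
instance (total_lambs : Int) : Decidable (Pre_solution total_lambs) := by unfold Pre_solution; infer_instance
def pvWitness_solution : Int := (10)

def Spec_solution (total_lambs : Int) (out : Int) : Prop := out = solution_alt total_lambs
instance (total_lambs : Int) (out : Int) : Decidable (Spec_solution total_lambs out) := by unfold Spec_solution; infer_instance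

-- ===== CLAIM (what is proved, stated in full; the proofs are below) =====
def Claim_equal_solution : Prop := ∀ (total_lambs : Int), Dom_solution total_lambs → Pre_solution total_lambs → Spec_solution total_lambs (solution total_lambs)

-- ===== LEMMAS AND PROOFS =====

-- A's powers-of-2 loop, started at state (p, min1, p_total) = (2^k, k, 2^k - 1),
-- computes size(t+1) - 1, i.e. the largest k with 2^k ≤ t+1.
lemma minLoop_closed : ∀ (d : Nat) (t : Int) (k : Nat),
    0 ≤ t → (2:Int) ^ k - 1 ≤ t → d = (t + 1 - 2 ^ k).toNat →
    solnMinLoop t (2 ^ k) (k : Int) (2 ^ k - 1) = (Nat.size (t + 1).toNat : Int) - 1 := by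
  intro d
  induction d using Nat.strong_induction_on with
  | _ d ih =>
    intro t k ht hk hd
    have hpos : (0:Int) < 2 ^ k := pow_pos (by norm_num) k
    have h2 : (2:Int) ^ (k + 1) = 2 ^ k * 2 := by ring
    rw [solnMinLoop]
    split_ifs with h
    · have hk' : (2:Int) ^ (k + 1) - 1 ≤ t := by omega
      have hstep : solnMinLoop t (2 ^ k * 2) ((k : Int) + 1) (2 ^ k - 1 + 2 ^ k)
          = solnMinLoop t (2 ^ (k + 1)) ((k + 1 : Nat) : Int) (2 ^ (k + 1) - 1) := by
        congr 1 <;> omega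
      rw [hstep, ih (t + 1 - 2 ^ (k + 1)).toNat (by omega) t (k + 1) ht hk' rfl]
    · -- here 2^k ≤ t+1 < 2^(k+1), so size (t+1).toNat = k+1
      have hub : t + 1 < 2 ^ (k + 1) := by omega
      have hlbN : 2 ^ k ≤ (t + 1).toNat := by
        have : ((2 ^ k : Nat) : Int) ≤ t + 1 := by push_cast; omega
        omega
      have hubN : (t + 1).toNat < 2 ^ (k + 1) := by
        have : (t + 1 : Int) < ((2 ^ (k + 1) : Nat) : Int) := by push_cast; omega
        omega
      have hs : Nat.size (t + 1).toNat = k + 1 :=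
        le_antisymm (Nat.size_le.mpr hubN) (Nat.lt_size.mpr hlbN)
      rw [hs]; push_cast; ring

-- B's pay loop at state (a, b) = (fib, fia + fib) is exactly A's Fibonacci loop
-- at state (fia, fib), with paid = f_total and cnt = max1.
lemma payLoop_eq_fibLoop : ∀ (d : Nat) (n fia fib paid cnt : Int),
    0 ≤ fia → 0 < fib → d = (n - paid).toNat →
    altPayLoop n fib (fia + fib) paid cnt = solnFibLoop n fia fib cnt paid := by
  intro d
  induction d using Nat.strong_induction_on with
  | _ d ih =>
    intro n fia fib paid cnt hfia hfib hd
    rw [altPayLoop, solnFibLoop]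
    split_ifs with h1 h2
    · exact ih (n - (paid + fib)).toNat (by omega) n fib (fia + fib) (paid + fib) (cnt + 1)
        (by omega) (by omega) rfl
    · omega
    · omega
    · rfl

-- unfolding B's loop twice at its start, for t ≥ 3
lemma altPayLoop_start (t : Int) (ht : 3 ≤ t) :
    altPayLoop t 1 1 0 0 = altPayLoop t 2 3 2 2 := by
  rw [altPayLoop, dif_pos (by omega : (0:Int) + 1 ≤ t ∧ (0:Int) < 1 ∧ (0:Int) < 1)]
  rw [altPayLoop, dif_pos (by omega : (0:Int) + 1 + 1 ≤ t ∧ (0:Int) < 1 ∧ (0:Int) < 1 + 1)]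
  norm_num

lemma min_start (t : Int) (ht : 0 ≤ t) :
    solnMinLoop t 1 0 0 = (Nat.size (t + 1).toNat : Int) - 1 := by
  have h := minLoop_closed (t + 1 - 2 ^ 0).toNat t 0 ht (by norm_num; omega) rfl
  norm_num at h
  exact h

-- small-input evaluations of B's loop
lemma altPay_zero : altPayLoop 0 1 1 0 0 = 0 := by
  rw [altPayLoop, dif_neg (by omega)]
lemma altPay_one : altPayLoop 1 1 1 0 0 = 1 := by
  rw [altPayLoop, dif_pos (by omega : (0:Int) + 1 ≤ 1 ∧ (0:Int) < 1 ∧ (0:Int) < 1)]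
  rw [altPayLoop, dif_neg (by omega)]; norm_num
lemma altPay_two : altPayLoop 2 1 1 0 0 = 2 := by
  rw [altPayLoop, dif_pos (by omega : (0:Int) + 1 ≤ 2 ∧ (0:Int) < 1 ∧ (0:Int) < 1)]
  rw [altPayLoop, dif_pos (by omega : (0:Int) + 1 + 1 ≤ 2 ∧ (0:Int) < 1 ∧ (0:Int) < 1 + 1)]
  rw [altPayLoop, dif_neg (by omega)]; norm_num

-- ===== VERDICT (by name: the statement is the Claim_ definition above) =====
theorem solution_spec : Claim_equal_solution := by
  intro t _ hpre
  have hpre' : (0:Int) ≤ t := hpre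
  unfold Spec_solution
  have hB : solution_alt t
      = altPayLoop t 1 1 0 0 - ((Nat.size (t + 1).toNat : Int) - 1) := by
    unfold solution_alt
    rw [if_neg (by omega : ¬ t < 0)]
  have hA : solution t
      = (if t ≤ 2 then t else solnFibLoop t 1 2 2 2) - solnMinLoop t 1 0 0 := rfl
  rw [hA, hB, min_start t hpre']
  by_cases h2 : t ≤ 2
  · rw [if_pos h2]
    have : t = 0 ∨ t = 1 ∨ t = 2 := by omega
    rcases this with rfl | rfl | rfl
    · rw [altPay_zero]
    · rw [altPay_one]
    · rw [altPay_two]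
  · rw [if_neg h2]
    rw [altPayLoop_start t (by omega)]
    have h := payLoop_eq_fibLoop (t - 2).toNat t 1 2 2 2 (by norm_num) (by norm_num) rfl
    norm_num at h
    rw [h]
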